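-- pv_equiv track=rewrite | github.com/bibymaths/bio-sea-pearl | alignment/bin/alignfm.py | extract_lcs_from_alignment
-- ===== SOURCE A (Python) =====
-- def extract_lcs_from_alignment(aln_a, aln_b):
--     runs, current_run = [], ""
--     for char_a, char_b in zip(aln_a, aln_b):
--         if char_a == char_b and char_a != '-':
--             current_run += char_a
--         else:
--             if current_run: runs.append(current_run)
--             current_run = ""
--     if current_run: runs.append(current_run)
--     return runs
-- ===== SOURCE B (Python) =====
-- def extract_lcs_from_alignment(aln_a, aln_b):
--     n = min(len(aln_a), len(aln_b))
--     runs, i = [], 0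
--     while i < n:
--         if aln_a[i] == aln_b[i] and aln_a[i] != '-':
--             j = i + 1
--             while j < n and aln_a[j] == aln_b[j] and aln_a[j] != '-':
--                 j += 1
--             runs.append(aln_a[i:j])
--             i = j
--         else:
--             i += 1
--     return runs
-- ===== Notes on version B (the rewrite author's own statement) =====
-- stated objective: alternative
-- what changed: Replaces the character-by-character accumulator with manual flushing by a two-pointer span scan: at each matching position an inner loop finds the end of the maximal matching block, which is emitted as one slice of aln_a.
import Mathlib
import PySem

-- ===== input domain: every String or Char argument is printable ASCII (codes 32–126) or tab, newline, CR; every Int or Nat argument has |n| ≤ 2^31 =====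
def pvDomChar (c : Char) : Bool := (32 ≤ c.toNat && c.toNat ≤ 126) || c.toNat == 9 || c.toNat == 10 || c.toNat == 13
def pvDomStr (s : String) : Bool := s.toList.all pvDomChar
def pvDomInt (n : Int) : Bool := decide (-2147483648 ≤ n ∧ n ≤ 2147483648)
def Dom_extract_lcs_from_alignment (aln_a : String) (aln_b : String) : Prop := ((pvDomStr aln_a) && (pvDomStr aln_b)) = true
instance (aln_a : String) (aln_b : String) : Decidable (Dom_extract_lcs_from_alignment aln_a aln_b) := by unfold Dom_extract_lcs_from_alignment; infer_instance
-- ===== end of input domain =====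

-- B replaces A's char-by-char accumulator with manual flushes by a span-based scan
-- that extracts each maximal matching block at once (objective: alternative, same cost).


-- ===== PORT A =====
-- one step of A's loop body: state = (runs, current_run)
def pvStepA (st : List String × String) (p : Char × Char) : List String × String :=
  if p.1 == p.2 && p.1 != '-' then (st.1, st.2.push p.1)
  else (if st.2 ≠ "" then st.1 ++ [st.2] else st.1, "")

def extract_lcs_from_alignment (aln_a : String) (aln_b : String) : List String :=
  let st := (List.zip aln_a.toList aln_b.toList).foldl pvStepA ([], "")
  if st.2 ≠ "" then st.1 ++ [st.2] else st.1

-- ===== PORT B =====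
-- Source B's match test on a zipped pair
def pvOkB (p : Char × Char) : Bool := p.1 == p.2 && p.1 != '-'

-- Source B's outer while-loop over the remaining pairs: at a matching head the inner
-- while extends to the maximal matching prefix (takeWhile), which is joined into
-- one run, and the rest (dropWhile) is processed next; a non-matching head is dropped.
def pvCollectB : List (Char × Char) → List String
  | [] => []
  | p :: t =>
    if pvOkB p then
      String.ofList (p.1 :: (t.takeWhile pvOkB).map Prod.fst) :: pvCollectB (t.dropWhile pvOkB)
    else pvCollectB t
  termination_by l => l.length
  decreasing_by
  · simp only [List.length_cons]
    exact Nat.lt_succ_of_le (List.length_dropWhile_le _ _)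
  · simp

def extract_lcs_from_alignment_alt (aln_a : String) (aln_b : String) : List String :=
  pvCollectB (List.zip aln_a.toList aln_b.toList)

-- ===== PRECONDITION & SPEC =====
def Spec_extract_lcs_from_alignment (aln_a : String) (aln_b : String) (out : List String) : Prop := out = extract_lcs_from_alignment_alt aln_a aln_b
instance (aln_a : String) (aln_b : String) (out : List String) : Decidable (Spec_extract_lcs_from_alignment aln_a aln_b out) := by unfold Spec_extract_lcs_from_alignment; infer_instance

-- ===== CLAIM (what is proved, stated in full; the proofs are below) =====
def Claim_equal_extract_lcs_from_alignment : Prop := ∀ (aln_a : String) (aln_b : String), Dom_extract_lcs_from_alignment aln_a aln_b → Spec_extract_lcs_from_alignment aln_a aln_b (extract_lcs_from_alignment aln_a aln_b)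

-- ===== LEMMAS AND PROOFS =====

-- cons the run `cs` onto `rest` only if nonempty
def pvCondCons (cs : List Char) (rest : List String) : List String :=
  if cs = [] then rest else String.ofList cs :: rest

lemma ne_empty_iff_toList (s : String) : (s ≠ "") ↔ s.toList ≠ [] := by
  constructor <;> intro h <;> intro hc <;> apply h
  · exact String.toList_inj.mp (by simp [hc])
  · simp [hc]

-- pvCollectB written through its first span
lemma pvCollectB_span (l : List (Char × Char)) :
    pvCollectB l = pvCondCons ((l.takeWhile pvOkB).map Prod.fst) (pvCollectB (l.dropWhile pvOkB)) := by
  cases l with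
  | nil => simp [pvCollectB, pvCondCons]
  | cons p t =>
    by_cases h : pvOkB p = true
    · simp [pvCollectB, h, pvCondCons]
    · simp [pvCollectB, h, pvCondCons]

-- invariant of A's fold, in terms of B's span decomposition
lemma foldA_invariant (l : List (Char × Char)) (runs : List String) (cur : String) :
    (if ((l.foldl pvStepA (runs, cur)).2 ≠ "") then
        (l.foldl pvStepA (runs, cur)).1 ++ [(l.foldl pvStepA (runs, cur)).2]
      else (l.foldl pvStepA (runs, cur)).1)
    = runs ++ pvCondCons (cur.toList ++ (l.takeWhile pvOkB).map Prod.fst)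
        (pvCollectB (l.dropWhile pvOkB)) := by
  induction l generalizing runs cur with
  | nil =>
    simp only [List.foldl_nil, List.takeWhile_nil, List.dropWhile_nil, List.map_nil,
      List.append_nil, pvCollectB, pvCondCons]
    by_cases h : cur = ""
    · simp [h]
    · simp [h, (ne_empty_iff_toList cur).mp h, String.ofList_toList]
  | cons p t ih =>
    by_cases h : pvOkB p = true
    · have h' : (p.1 == p.2 && p.1 != '-') = true := h
      have hstep : pvStepA (runs, cur) p = (runs, cur.push p.1) := by
        simp [pvStepA, h']
      rw [List.foldl_cons, hstep, ih, List.takeWhile_cons, List.dropWhile_cons]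
      simp [h, String.toList_push]
    · rw [Bool.not_eq_true] at h
      have h' : (p.1 == p.2 && p.1 != '-') = false := h
      have hstep : pvStepA (runs, cur) p
          = (if cur ≠ "" then runs ++ [cur] else runs, "") := by
        simp [pvStepA, h']
      rw [List.foldl_cons, hstep, ih]
      have htake : List.takeWhile pvOkB (p :: t) = [] := by
        simp [h]
      have hdrop : List.dropWhile pvOkB (p :: t) = p :: t := by
        simp [h]
      rw [htake, hdrop]
      have hrest : pvCollectB (p :: t) = pvCollectB t := by
        simp [pvCollectB, h]
      rw [hrest, show ("" : String).toList = [] from rfl, List.nil_append,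
        ← pvCollectB_span t]
      simp only [List.map_nil, List.append_nil]
      by_cases hc : cur = ""
      · simp [hc, pvCondCons]
      · simp [hc, pvCondCons, (ne_empty_iff_toList cur).mp hc, String.ofList_toList]

-- ===== VERDICT (by name: the statement is the Claim_ definition above) =====
theorem extract_lcs_from_alignment_spec : Claim_equal_extract_lcs_from_alignment := by
  intro aln_a aln_b _
  unfold Spec_extract_lcs_from_alignment extract_lcs_from_alignment extract_lcs_from_alignment_alt
  have h := foldA_invariant (List.zip aln_a.toList aln_b.toList) [] ""
  simp only [List.nil_append] at h
  rw [h]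
  have hT : ("" : String).toList = [] := rfl
  rw [hT, List.nil_append, ← pvCollectB_span]
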